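-- pv_equiv track=rewrite | github.com/akhandsingh17/assignments | codingexercise/CounterDictionary.py | CounterDictionary
-- ===== SOURCE A (Python) =====
-- def getDict(str):
--
--     dict={}
--
--     for i in range(0,len(str)):
--
--         key=str[i]
--         if key in dict.keys():
--             dict[key]=dict.get(key)+1
--         else:
--             dict[key]=1
--
--     return dict
--
-- def CounterDictionary(s1,s2):
--
--     dict1=getDict(s1)
--     dict2=getDict(s2)
--     flg=True
--
--     for key,val in dict1.items():
--         if key in dict2.keys() and val <= dict2.get(key):
--             continue
--         else:
--             flg=False
--
--     if flg==True:
--         return "Possible"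
--     else:
--         return "Not Possible"
-- ===== SOURCE B (Python) =====
-- def CounterDictionary(s1, s2):
--     # Build one frequency pool for s2 and consume it with a single pass over s1.
--     pool = {}
--     for c in s2:
--         pool[c] = pool.get(c, 0) + 1
--     for c in s1:
--         if pool.get(c, 0) <= 0:
--             return "Not Possible"
--         pool[c] -= 1
--     return "Possible"
-- ===== Notes on version B (the rewrite author's own statement) =====
-- stated objective: simpler
-- what changed: Instead of building frequency dicts for both strings and comparing every key of the first against the second, B builds one frequency pool for s2 only and makes a single consuming pass over s1, decrementing the pool and returning early on the first deficit.
import Mathlib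
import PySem

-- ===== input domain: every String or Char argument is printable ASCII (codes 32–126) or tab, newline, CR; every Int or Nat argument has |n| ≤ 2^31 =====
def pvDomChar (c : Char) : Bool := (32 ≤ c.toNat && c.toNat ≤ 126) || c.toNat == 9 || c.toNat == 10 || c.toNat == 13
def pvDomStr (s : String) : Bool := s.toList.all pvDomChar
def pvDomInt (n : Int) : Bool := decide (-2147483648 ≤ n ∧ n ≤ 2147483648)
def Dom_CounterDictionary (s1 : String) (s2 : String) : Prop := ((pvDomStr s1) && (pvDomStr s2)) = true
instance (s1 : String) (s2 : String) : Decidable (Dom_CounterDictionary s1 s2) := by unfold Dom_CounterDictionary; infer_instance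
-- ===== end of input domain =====

-- B builds one frequency pool for s2 and consumes it in a single pass over s1 (early exit),
-- instead of A's two frequency dicts compared key by key; same value everywhere, objective: simpler.

-- ===== PORT A =====
def pvGetDict (s : String) : PySem.Dict Char Int :=
  s.toList.foldl
    (fun d key =>
      if d.contains key then d.insert key (d.getD key 0 + 1) else d.insert key 1)
    PySem.Dict.empty

def CounterDictionary (s1 : String) (s2 : String) : String :=
  let dict1 := pvGetDict s1
  let dict2 := pvGetDict s2
  let flg := dict1.items.foldl
    (fun flg p => if dict2.contains p.1 ∧ p.2 ≤ dict2.getD p.1 0 then flg else false) true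
  if flg then "Possible" else "Not Possible"

-- ===== PORT B =====
def pvConsume (cs : List Char) (pool : PySem.Dict Char Int) : String :=
  match cs with
  | [] => "Possible"
  | c :: rest =>
    if pool.getD c 0 ≤ 0 then "Not Possible"
    else pvConsume rest (pool.insert c (pool.getD c 0 - 1))

def CounterDictionary_alt (s1 : String) (s2 : String) : String :=
  let pool := s2.toList.foldl (fun d c => d.insert c (d.getD c 0 + 1)) PySem.Dict.empty
  pvConsume s1.toList pool

-- ===== PRECONDITION & SPEC =====
def Spec_CounterDictionary (s1 : String) (s2 : String) (out : String) : Prop := out = CounterDictionary_alt s1 s2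
instance (s1 : String) (s2 : String) (out : String) : Decidable (Spec_CounterDictionary s1 s2 out) := by unfold Spec_CounterDictionary; infer_instance

-- ===== CLAIM (what is proved, stated in full; the proofs are below) =====
def Claim_equal_CounterDictionary : Prop := ∀ (s1 : String) (s2 : String), Dom_CounterDictionary s1 s2 → Spec_CounterDictionary s1 s2 (CounterDictionary s1 s2)

-- ===== LEMMAS AND PROOFS =====

lemma pvGetDict_eq_counter (s : String) : pvGetDict s = PySem.Dict.counter s.toList := by
  rw [← PySem.Dict.foldl_insert_getD_add_one_eq_counter]
  unfold pvGetDict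
  congr 1
  funext d k
  by_cases h : d.contains k = true
  · simp [h]
  · simp only [Bool.not_eq_true] at h
    simp [h, PySem.Dict.getD_of_not_contains _ _ h]

lemma foldl_if_all {α : Type} (C : α → Prop) [DecidablePred C] (l : List α) (b : Bool) :
    l.foldl (fun f p => if C p then f else false) b = (b && l.all (fun p => decide (C p))) := by
  induction l generalizing b with
  | nil => simp
  | cons p cs ih =>
    rw [List.foldl_cons, ih]
    by_cases h : C p <;> simp [h]

lemma A_eq (s1 s2 : String) :
    CounterDictionary s1 s2 = if (∀ c ∈ s1.toList, (s1.toList.count c : Int) ≤ (s2.toList.count c : Int)) then "Possible" else "Not Possible" := by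
  have h0 : CounterDictionary s1 s2 =
      (if (pvGetDict s1).items.foldl
          (fun flg p => if (pvGetDict s2).contains p.1 ∧ p.2 ≤ (pvGetDict s2).getD p.1 0
            then flg else false) true
        then "Possible" else "Not Possible") := rfl
  rw [h0, pvGetDict_eq_counter, pvGetDict_eq_counter, foldl_if_all]
  simp only [Bool.true_and]
  have hall : ((PySem.Dict.counter s1.toList).items.all
      (fun p => decide ((PySem.Dict.counter s2.toList).contains p.1 = true ∧
        p.2 ≤ (PySem.Dict.counter s2.toList).getD p.1 0)) = true) ↔
      (∀ c ∈ s1.toList, (s1.toList.count c : Int) ≤ (s2.toList.count c : Int)) := by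
    rw [PySem.Dict.items_counter]
    simp only [List.all_map, List.all_eq_true, Function.comp, decide_eq_true_eq,
      PySem.Dict.getD_counter, PySem.Dict.contains_counter]
    constructor
    · intro h c hc
      exact (h c ((PySem.Set.mem_ofList _ _).mpr hc)).2
    · intro h c hc
      have hc' : c ∈ s1.toList := (PySem.Set.mem_ofList _ _).mp hc
      have hle := h c hc'
      have h1 : 1 ≤ s1.toList.count c := List.one_le_count_iff.mpr hc'
      have h2 : c ∈ s2.toList := by
        by_contra hn
        rw [List.count_eq_zero_of_not_mem hn] at hle
        omega
      exact ⟨by simpa using h2, hle⟩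
  by_cases hp : ∀ c ∈ s1.toList, (s1.toList.count c : Int) ≤ (s2.toList.count c : Int)
  · rw [if_pos hp, if_pos (hall.mpr hp)]
  · rw [if_neg hp, if_neg (fun hb => hp (hall.mp hb))]

lemma pvConsume_eq (cs : List Char) (d : PySem.Dict Char Int) :
    pvConsume cs d =
      if (∀ c ∈ cs, (cs.count c : Int) ≤ d.getD c 0) then "Possible" else "Not Possible" := by
  induction cs generalizing d with
  | nil => simp [pvConsume]
  | cons c rest ih =>
    unfold pvConsume
    by_cases hg : d.getD c 0 ≤ 0
    · rw [if_pos hg, if_neg]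
      intro h
      have hc := h c (by simp)
      have h1 : 1 ≤ (c :: rest).count c := List.one_le_count_iff.mpr (by simp)
      omega
    · rw [if_neg hg, ih]
      have hiff : (∀ x ∈ rest, (rest.count x : Int) ≤ (d.insert c (d.getD c 0 - 1)).getD x 0)
          ↔ (∀ x ∈ c :: rest, ((c :: rest).count x : Int) ≤ d.getD x 0) := by
        constructor
        · intro h x hx
          rcases eq_or_ne x c with rfl | hne
          · by_cases hr : x ∈ rest
            · have hh := h x hr
              rw [PySem.Dict.getD_insert, if_pos rfl] at hh
              simp only [List.count_cons_self]
              push_cast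
              omega
            · simp only [List.count_cons_self, List.count_eq_zero_of_not_mem hr]
              omega
          · rcases List.mem_cons.mp hx with hx' | hx'
            · exact absurd hx' hne
            · have hh := h x hx'
              rw [PySem.Dict.getD_insert, if_neg hne] at hh
              simpa [List.count_cons, Ne.symm hne] using hh
        · intro h x hx
          rw [PySem.Dict.getD_insert]
          rcases eq_or_ne x c with rfl | hne
          · have hh := h x (by simp)
            simp only [List.count_cons_self] at hh
            rw [if_pos rfl]
            push_cast at hh ⊢
            omega
          · rw [if_neg hne]
            have hh := h x (by simp [hx])
            simpa [List.count_cons, Ne.symm hne] using hh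
      by_cases hp : ∀ x ∈ c :: rest, ((c :: rest).count x : Int) ≤ d.getD x 0
      · rw [if_pos (hiff.mpr hp), if_pos hp]
      · rw [if_neg (fun h => hp (hiff.mp h)), if_neg hp]

lemma B_eq (s1 s2 : String) :
    CounterDictionary_alt s1 s2 = if (∀ c ∈ s1.toList, (s1.toList.count c : Int) ≤ (s2.toList.count c : Int)) then "Possible" else "Not Possible" := by
  unfold CounterDictionary_alt
  rw [PySem.Dict.foldl_insert_getD_add_one_eq_counter, pvConsume_eq]
  simp only [PySem.Dict.getD_counter]

-- ===== VERDICT (by name: the statement is the Claim_ definition above) =====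
theorem CounterDictionary_spec : Claim_equal_CounterDictionary := by
  intro s1 s2 _
  unfold Spec_CounterDictionary
  rw [A_eq, B_eq]
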